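-- pv_equiv track=rewrite | github.com/youssefhage/ahtrading-erp-pos | scripts/import_erpnext_ah_trading_via_api.py | _header_index
-- ===== SOURCE A (Python) =====
-- def _header_index(header: list[str]) -> dict[str, int]:
--     # ERPNext export sometimes contains duplicate column names. We only record the
--     # first occurrence of each header label.
--     idx: dict[str, int] = {}
--     for i, h in enumerate(header):
--         k = (h or "").strip()
--         if not k or k in idx:
--             continue
--         idx[k] = i
--     return idx
-- ===== SOURCE B (Python) =====
-- def _header_index(header: list[str]) -> dict[str, int]:
--     # Strip all labels first; a reverse enumeration comprehension leaves each label
--     # mapped to its FIRST index (later, smaller indices overwrite); dict.fromkeys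
--     # restores first-occurrence key order, dropping empty labels.
--     stripped = [(h or "").strip() for h in header]
--     first = {k: i for i, k in reversed(list(enumerate(stripped)))}
--     return {k: first[k] for k in dict.fromkeys(stripped) if k}
-- ===== Notes on version B (the rewrite author's own statement) =====
-- stated objective: alternative
-- what changed: A's single guarded accumulation loop (strip, skip empty/seen, insert) is replaced by a three-stage pipeline: strip every label, build a first-index map by a REVERSE enumeration comprehension with unconditional overwrite (no seen-guard), then emit the nonempty labels in dict.fromkeys first-occurrence order.
import Mathlib
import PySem

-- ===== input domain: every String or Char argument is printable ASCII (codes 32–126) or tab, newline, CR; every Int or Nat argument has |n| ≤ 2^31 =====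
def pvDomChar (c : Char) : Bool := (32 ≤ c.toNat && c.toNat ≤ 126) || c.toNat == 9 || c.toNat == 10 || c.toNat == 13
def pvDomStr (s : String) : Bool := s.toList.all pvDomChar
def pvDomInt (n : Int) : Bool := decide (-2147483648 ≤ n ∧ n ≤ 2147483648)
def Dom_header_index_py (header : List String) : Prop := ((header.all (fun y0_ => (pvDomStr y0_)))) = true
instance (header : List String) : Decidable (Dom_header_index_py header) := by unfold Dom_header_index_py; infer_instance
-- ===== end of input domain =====

-- B replaces A's guarded accumulation loop by a pipeline: strip all labels, build a first-index map by a reverse pass with unconditional overwrite, then emit the nonempty labels in ordered-dedup order (alternative decomposition, same result).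

-- ===== PORT A =====
def header_index_py (header : List String) : List (String × Int) :=
  ((PySem.List.enumerate header 0).foldl
    (fun (idx : PySem.Dict String Int) p =>
      let k := PySem.Str.strip (if p.2 = "" then "" else p.2)
      if k = "" || idx.contains k then idx else idx.insert k p.1)
    PySem.Dict.empty).items

-- ===== PORT B =====
def header_index_py_alt (header : List String) : List (String × Int) :=
  let stripped := header.map (fun h => PySem.Str.strip (if h = "" then "" else h))
  let first := (PySem.List.enumerate stripped 0).reverse.foldl
      (fun (d : PySem.Dict String Int) p => d.insert p.2 p.1) PySem.Dict.empty
  -- first[k]: every looked-up key is in `first` (it comes from `stripped`), so getD's default is never read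
  (((PySem.List.dedup stripped).filter (fun k => k ≠ "")).foldl
      (fun (d : PySem.Dict String Int) k => d.insert k (first.getD k 0)) PySem.Dict.empty).items

-- ===== PRECONDITION & SPEC =====
def Spec_header_index_py (header : List String) (out : List (String × Int)) : Prop := out = header_index_py_alt header
instance (header : List String) (out : List (String × Int)) : Decidable (Spec_header_index_py header out) := by unfold Spec_header_index_py; infer_instance

-- ===== CLAIM (what is proved, stated in full; the proofs are below) =====
def Claim_equal_header_index_py : Prop := ∀ (header : List String), Dom_header_index_py header → Spec_header_index_py header (header_index_py header)

-- ===== LEMMAS AND PROOFS =====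

-- A's loop step, abstracted over the already-stripped label ('or'-guard and strip pulled out)
def pvStep (idx : PySem.Dict String Int) (p : Int × String) : PySem.Dict String Int :=
  if p.2 = "" || idx.contains p.2 then idx else idx.insert p.2 p.1

-- values agree after shifting by the extra head: cons shifts every first index by one
theorem pv_shift (t : List String) (h : String) (i0 : Int) (X : List String)
    (hmem : ∀ k ∈ X, k ∈ t ∧ k ≠ h) :
    X.map (fun k => (k, i0 + (((PySem.List.index? (h :: t) k).getD 0 : Nat) : Int)))
      = X.map (fun k => (k, (i0 + 1) + (((PySem.List.index? t k).getD 0 : Nat) : Int))) := by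
  apply List.map_congr_left
  intro k hk
  obtain ⟨hkt, hkh⟩ := hmem k hk
  rw [PySem.List.index?_cons_of_ne t (Ne.symm hkh)]
  obtain ⟨n, hn⟩ := Option.isSome_iff_exists.mp ((PySem.List.index?_isSome_iff t k).mpr hkt)
  rw [hn]
  simp
  ring

-- a head the filter rejects can be discarded before filtering
theorem pv_drop (X : List String) (h : String) (p : String → Bool) (hp : p h = false) :
    (PySem.Set.discard X h).filter p = X.filter p := by
  simp only [PySem.Set.discard, List.filter_filter]
  apply List.filter_congr
  intro k _
  by_cases hk : k = h
  · simp [hk, hp]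
  · simp [hk]

-- Main invariant: folding A's step over the enumeration of any (already stripped) list s
-- appends, to the accumulator's items, the fresh nonempty labels of s in first-occurrence
-- order, each paired with i0 plus its first index in s.
theorem pv_fold_items (s : List String) (i0 : Int) (d : PySem.Dict String Int) :
    ((PySem.List.enumerate s i0).foldl pvStep d).items =
      d.items ++ ((PySem.List.dedup s).filter
          (fun k => !(decide (k = "") || d.contains k))).map
        (fun k => (k, i0 + (((PySem.List.index? s k).getD 0 : Nat) : Int))) := by
  induction s generalizing i0 d with
  | nil => simp [PySem.List.enumerate, PySem.List.dedup, PySem.Set.ofList]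
  | cons h t ih =>
    rw [PySem.List.enumerate_cons]
    simp only [List.foldl_cons]
    have hded : PySem.List.dedup (h :: t) = h :: PySem.Set.discard (PySem.List.dedup t) h := by
      simp [PySem.Set.ofList_cons]
    rw [hded]
    by_cases hh : h = ""
    · subst hh
      have hstep : pvStep d (i0, "") = d := by simp [pvStep]
      rw [hstep, ih]
      have hph : (!(decide (("" : String) = "") || d.contains "")) = false := by simp
      rw [List.filter_cons_of_neg (by simp), pv_drop _ _ _ hph]
      congr 1
      apply (pv_shift t "" i0 _ ?_).symm
      intro k hk
      have hm := List.mem_filter.mp hk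
      refine ⟨(PySem.List.mem_dedup _ _).mp hm.1, ?_⟩
      have h2 := hm.2
      simp at h2
      exact h2.1
    · by_cases hc : d.contains h = true
      · have hstep : pvStep d (i0, h) = d := by simp [pvStep, hc]
        rw [hstep, ih]
        have hph : (!(decide (h = "") || d.contains h)) = false := by simp [hc]
        rw [List.filter_cons_of_neg (by simp [hc]), pv_drop _ _ _ hph]
        congr 1
        apply (pv_shift t h i0 _ ?_).symm
        intro k hk
        have hm := List.mem_filter.mp hk
        refine ⟨(PySem.List.mem_dedup _ _).mp hm.1, ?_⟩
        intro hkh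
        rw [hkh] at hm
        simp [hc] at hm
      · have hcf : d.contains h = false := by simpa using hc
        have hstep : pvStep d (i0, h) = d.insert h i0 := by simp [pvStep, hh, hcf]
        rw [hstep, ih, PySem.Dict.items_insert_of_not_contains d i0 hcf]
        rw [List.filter_cons_of_pos (by simp [hh, hcf])]
        rw [List.map_cons, PySem.List.index?_cons_self]
        simp only [Option.getD_some, Nat.cast_zero, add_zero, List.append_assoc, List.cons_append,
          List.nil_append]
        congr 2
        have hfilt : (PySem.List.dedup t).filter
            (fun k => !(decide (k = "") || (d.insert h i0).contains k))
            = ((PySem.Set.discard (PySem.List.dedup t) h).filter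
                (fun k => !(decide (k = "") || d.contains k))) := by
          simp only [PySem.Dict.contains_insert, PySem.Set.discard, List.filter_filter]
          apply List.filter_congr
          intro k _
          by_cases hk : k = h <;> simp [hk, Bool.and_comm, Bool.and_left_comm]
        rw [hfilt]
        apply (pv_shift t h i0 _ ?_).symm
        intro k hk
        have hm := List.mem_filter.mp hk
        exact ⟨(PySem.List.mem_dedup _ _).mp ((PySem.Set.mem_discard _ _ _).mp hm.1).1,
          ((PySem.Set.mem_discard _ _ _).mp hm.1).2⟩

-- enumerating a mapped list = mapping the enumeration's values
theorem pv_enumerate_map (g : String → String) (l : List String) (i0 : Int) :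
    PySem.List.enumerate (l.map g) i0
      = (PySem.List.enumerate l i0).map (fun p => (p.1, g p.2)) := by
  induction l generalizing i0 with
  | nil => simp [PySem.List.enumerate]
  | cons x xs ih => rw [List.map_cons, PySem.List.enumerate_cons, PySem.List.enumerate_cons,
      List.map_cons, ih]

-- B-side: the reverse-pass dict maps each key to i0 + its first index

theorem pv_first_get? (s : List String) (i0 : Int) (d : PySem.Dict String Int) (k : String) :
    ((PySem.List.enumerate s i0).reverse.foldl
        (fun (d : PySem.Dict String Int) p => d.insert p.2 p.1) d).get? k
      = match PySem.List.index? s k with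
        | some n => some (i0 + (n : Int))
        | none => d.get? k := by
  induction s generalizing i0 d with
  | nil => simp [PySem.List.enumerate, PySem.List.index?]
  | cons h t ih =>
    rw [PySem.List.enumerate_cons, List.reverse_cons, List.foldl_append]
    simp only [List.foldl_cons, List.foldl_nil]
    rw [PySem.Dict.get?_insert]
    by_cases hk : k = h
    · subst hk
      rw [PySem.List.index?_cons_self]
      simp
    · rw [if_neg hk, ih, PySem.List.index?_cons_of_ne t (fun e => hk e.symm)]
      cases hn : PySem.List.index? t k with
      | none => simp
      | some n => simp; ring

theorem pv_build_items (l : List String) (f : String → Int) (d : PySem.Dict String Int)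
    (hfresh : ∀ k ∈ l, d.contains k = false) (hnd : l.Nodup) :
    (l.foldl (fun (d : PySem.Dict String Int) k => d.insert k (f k)) d).items
      = d.items ++ l.map (fun k => (k, f k)) := by
  induction l generalizing d with
  | nil => simp
  | cons h t ih =>
    simp only [List.foldl_cons, List.map_cons]
    rw [ih _ ?_ (List.Nodup.of_cons hnd),
      PySem.Dict.items_insert_of_not_contains d (f h) (hfresh h (List.mem_cons_self))]
    · simp
    · intro k hk
      rw [PySem.Dict.contains_insert]
      have : k ≠ h := fun e => (List.nodup_cons.mp hnd).1 (e ▸ hk)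
      simp [this, hfresh k (List.mem_cons_of_mem _ hk)]

-- ===== VERDICT (by name: the statement is the Claim_ definition above) =====
theorem header_index_py_spec : Claim_equal_header_index_py := by
  intro header _
  unfold Spec_header_index_py header_index_py header_index_py_alt
  rw [show (fun (idx : PySem.Dict String Int) (p : Int × String) =>
      let k := PySem.Str.strip (if p.2 = "" then "" else p.2)
      if k = "" || idx.contains k then idx else idx.insert k p.1)
    = (fun idx p => pvStep idx (p.1, PySem.Str.strip (if p.2 = "" then "" else p.2))) from rfl]
  rw [show List.foldl
        (fun (idx : PySem.Dict String Int) (p : Int × String) =>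
          pvStep idx (p.1, PySem.Str.strip (if p.2 = "" then "" else p.2)))
        PySem.Dict.empty (PySem.List.enumerate header 0)
      = List.foldl pvStep PySem.Dict.empty
          (PySem.List.enumerate (header.map (fun h => PySem.Str.strip (if h = "" then "" else h))) 0) from by
    rw [pv_enumerate_map]
    exact List.foldl_map.symm]
  rw [pv_fold_items]
  rw [pv_build_items _ _ _ (fun k _ => PySem.Dict.contains_empty k)
    (List.Nodup.filter _ (PySem.List.nodup_dedup _))]
  have hemp : (PySem.Dict.empty : PySem.Dict String Int).items = [] := rfl
  rw [hemp, List.nil_append, List.nil_append]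
  simp only [PySem.Dict.contains_empty, Bool.or_false, decide_not]
  apply List.map_congr_left
  intro k hk
  have hks : k ∈ header.map (fun h => PySem.Str.strip (if h = "" then "" else h)) := by
    exact (PySem.List.mem_dedup _ _).mp (List.mem_filter.mp hk).1
  obtain ⟨n, hn⟩ := Option.isSome_iff_exists.mp ((PySem.List.index?_isSome_iff _ k).mpr hks)
  rw [PySem.Dict.getD_eq_get?_getD, pv_first_get?, hn]
  simp
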